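-- pv_equiv track=rewrite | github.com/FacialStylization/ConstFS | app.py | generate_target_blocks
-- ===== SOURCE A (Python) =====
-- def generate_target_blocks(style_input_str, layout_input_str, is_style_only):
--     up_blocks_str = "up_blocks"
--     down_blocks_str = "down_blocks"
--     attention_str = "attentions.1"
--
--     if style_input_str.isdigit():
--         style_target_block = up_blocks_str + '.' + style_input_str + '.' + attention_str
--         style_target_blocks = [style_target_block]
--         if is_style_only:
--             return style_target_blocks
--         else:
--             if layout_input_str.isdigit():
--                 layout_target_block = down_blocks_str + '.' + layout_input_str + '.' + attention_str
--                 style_target_blocks.append(layout_target_block)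
--             else:
--                 layout_target_blocks = [down_blocks_str + '.' + num.strip() + '.' + attention_str for num in layout_input_str.split(',')]
--                 style_target_blocks.extend(layout_target_blocks)
--             return style_target_blocks
--     else:
--         style_target_blocks = [up_blocks_str + '.' + num.strip() + '.' + attention_str for num in style_input_str.split(',')]
--         if is_style_only:
--             return style_target_blocks
--         if layout_input_str.isdigit():
--             layout_target_block = down_blocks_str + '.' + layout_input_str + '.' + attention_str
--             style_target_blocks.append(layout_target_block)
--         else:
--             layout_target_blocks = [down_blocks_str + '.' + num.strip() + '.' + attention_str for num in layout_input_str.split(',')]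
--             style_target_blocks.extend(layout_target_blocks)
--         return style_target_blocks
-- ===== SOURCE B (Python) =====
-- def generate_target_blocks(style_input_str, layout_input_str, is_style_only):
--     out = []
--
--     def scan(prefix, s):
--         tok = ''
--         for ch in s:
--             if ch == ',':
--                 out.append(prefix + '.' + tok.strip() + '.attentions.1')
--                 tok = ''
--             else:
--                 tok += ch
--         out.append(prefix + '.' + tok.strip() + '.attentions.1')
--
--     scan('up_blocks', style_input_str)
--     if not is_style_only:
--         scan('down_blocks', layout_input_str)
--     return out
-- ===== Notes on version B (the rewrite author's own statement) =====
-- stated objective: alternative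
-- what changed: Replaces A's isdigit/split branching and list comprehensions with a single-pass character-level scanner: one loop over each input string that accumulates a token and emits a formatted block at every comma (and once at the end), so no isdigit test and no split() call remain.
import Mathlib
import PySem

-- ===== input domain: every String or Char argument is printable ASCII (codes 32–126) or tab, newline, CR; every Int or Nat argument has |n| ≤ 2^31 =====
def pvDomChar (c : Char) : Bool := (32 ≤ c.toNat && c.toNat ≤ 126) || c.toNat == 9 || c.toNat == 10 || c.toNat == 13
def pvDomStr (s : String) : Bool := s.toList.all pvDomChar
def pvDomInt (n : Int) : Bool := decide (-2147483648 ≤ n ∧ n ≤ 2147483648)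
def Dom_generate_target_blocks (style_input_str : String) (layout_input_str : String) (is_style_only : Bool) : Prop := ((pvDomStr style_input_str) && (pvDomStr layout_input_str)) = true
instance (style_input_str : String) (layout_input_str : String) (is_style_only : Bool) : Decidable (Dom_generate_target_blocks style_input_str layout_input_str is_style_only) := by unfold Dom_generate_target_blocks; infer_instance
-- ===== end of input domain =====

-- B replaces A's isdigit/split branching with a single-pass character scanner that emits a block at each comma (objective: alternative).

-- ===== PORT A =====
def generate_target_blocks (style_input_str : String) (layout_input_str : String) (is_style_only : Bool) : List String :=
  let up_blocks_str := "up_blocks"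
  let down_blocks_str := "down_blocks"
  let attention_str := "attentions.1"
  if PySem.Str.strIsdigit style_input_str then
    let style_target_block := up_blocks_str ++ "." ++ style_input_str ++ "." ++ attention_str
    let style_target_blocks := [style_target_block]
    if is_style_only then style_target_blocks
    else
      if PySem.Str.strIsdigit layout_input_str then
        let layout_target_block := down_blocks_str ++ "." ++ layout_input_str ++ "." ++ attention_str
        style_target_blocks ++ [layout_target_block]
      else
        let layout_target_blocks := ((PySem.Str.split? layout_input_str ",").getD []).map
          (fun num => down_blocks_str ++ "." ++ PySem.Str.strip num ++ "." ++ attention_str)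
        style_target_blocks ++ layout_target_blocks
  else
    let style_target_blocks := ((PySem.Str.split? style_input_str ",").getD []).map
      (fun num => up_blocks_str ++ "." ++ PySem.Str.strip num ++ "." ++ attention_str)
    if is_style_only then style_target_blocks
    else
      if PySem.Str.strIsdigit layout_input_str then
        let layout_target_block := down_blocks_str ++ "." ++ layout_input_str ++ "." ++ attention_str
        style_target_blocks ++ [layout_target_block]
      else
        let layout_target_blocks := ((PySem.Str.split? layout_input_str ",").getD []).map
          (fun num => down_blocks_str ++ "." ++ PySem.Str.strip num ++ "." ++ attention_str)
        style_target_blocks ++ layout_target_blocks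

-- ===== PORT B =====
-- emit: pre + '.' + tok.strip() + '.attentions.1'
def pvEmit (pre : String) (tok : List Char) : String :=
  pre ++ "." ++ PySem.Str.strip (String.ofList tok) ++ ".attentions.1"

-- the 'for ch in s' loop of B's scan, with state (tok, out-so-far)
def pvScan (pre : String) : List Char → List Char → List String → List String
  | [], tok, out => out ++ [pvEmit pre tok]
  | c :: rest, tok, out =>
    if c = ',' then pvScan pre rest [] (out ++ [pvEmit pre tok])
    else pvScan pre rest (tok ++ [c]) out

def generate_target_blocks_alt (style_input_str : String) (layout_input_str : String) (is_style_only : Bool) : List String :=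
  let out := pvScan "up_blocks" style_input_str.toList [] []
  if !is_style_only then pvScan "down_blocks" layout_input_str.toList [] out
  else out

-- ===== PRECONDITION & SPEC =====
def Spec_generate_target_blocks (style_input_str : String) (layout_input_str : String) (is_style_only : Bool) (out : List String) : Prop := out = generate_target_blocks_alt style_input_str layout_input_str is_style_only
instance (style_input_str : String) (layout_input_str : String) (is_style_only : Bool) (out : List String) : Decidable (Spec_generate_target_blocks style_input_str layout_input_str is_style_only out) := by unfold Spec_generate_target_blocks; infer_instance

-- ===== CLAIM (what is proved, stated in full; the proofs are below) =====
def Claim_equal_generate_target_blocks : Prop := ∀ (style_input_str : String) (layout_input_str : String) (is_style_only : Bool), Dom_generate_target_blocks style_input_str layout_input_str is_style_only → Spec_generate_target_blocks style_input_str layout_input_str is_style_only (generate_target_blocks style_input_str layout_input_str is_style_only)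

-- ===== LEMMAS AND PROOFS =====

lemma att_group (t : String) : t ++ "." ++ "attentions.1" = t ++ ".attentions.1" := by
  rw [String.append_assoc]
  rfl

-- the scanner equals splitOn's worker, mapped through pvEmit
lemma scan_eq_go (p : String) : ∀ (fuel : Nat) (cs tok : List Char) (racc : List (List Char))
    (out : List String), cs.length < fuel →
    pvScan p cs tok (out ++ racc.reverse.map (pvEmit p)) =
      out ++ (PySem.Chars.splitOn.go [','] fuel cs tok.reverse racc).map (pvEmit p) := by
  intro fuel
  induction fuel with
  | zero => intro cs tok racc out h; omega
  | succ fuel ih =>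
    intro cs tok racc out h
    cases cs with
    | nil =>
      simp [pvScan, PySem.Chars.splitOn.go]
    | cons c rest =>
      rw [PySem.Chars.splitOn.go]
      by_cases hc : c = ','
      · subst hc
        have hpre : List.isPrefixOf [','] (',' :: rest) = true := by
          simp
        simp only [pvScan, hpre, List.reverse_reverse]
        rw [List.append_assoc]
        have hmain := ih rest [] (tok :: racc) out (by simp at h ⊢; omega)
        simpa using hmain
      · have hpre : List.isPrefixOf [','] (c :: rest) = false := by
          simp [List.isPrefixOf_cons₂]
          intro hcc
          exact absurd hcc.symm hc
        simp only [pvScan, if_neg hc, hpre, if_neg Bool.false_ne_true]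
        have hmain := ih rest (tok ++ [c]) racc out (by simp at h ⊢; omega)
        simpa using hmain

lemma scan_eq_split (p : String) (cs : List Char) (out : List String) :
    pvScan p cs [] out = out ++ (PySem.Chars.splitOn cs [',']).map (pvEmit p) := by
  have := scan_eq_go p (cs.length + 1) cs [] [] out (by omega)
  simpa [PySem.Chars.splitOn] using this

-- A's split-comprehension branch equals the scanner's emission map
lemma a_map (pre s : String) :
    ((PySem.Str.split? s ",").getD []).map
        (fun num => pre ++ "." ++ PySem.Str.strip num ++ "." ++ "attentions.1") =
      (PySem.Chars.splitOn s.toList [',']).map (pvEmit pre) := by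
  simp [PySem.Str.split?, PySem.Chars.split?, List.map_map]
  intro t _
  simp [pvEmit, PySem.Str.strip, att_group]

lemma dropWhile_eq_self_of_false {α : Type} (p : α → Bool) (l : List α)
    (h : ∀ a ∈ l, p a = false) : List.dropWhile p l = l := by
  cases l with
  | nil => rfl
  | cons a t => simp [h a (List.mem_cons_self)]

lemma isdigit_not_isspace (c : Char) (h : PySem.Chars.isdigit c = true) :
    PySem.Chars.isspace c = false := by
  simp [PySem.Chars.isdigit, Char.le_def, UInt32.le_iff_toNat_le] at h
  have h1 : 48 ≤ c.toNat := h.1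
  simp [PySem.Chars.isspace]
  omega

lemma strip_digits (cs : List Char) (h : ∀ c ∈ cs, PySem.Chars.isdigit c = true) :
    PySem.Chars.strip cs = cs := by
  unfold PySem.Chars.strip PySem.Chars.lstrip PySem.Chars.rstrip
  rw [dropWhile_eq_self_of_false _ cs (fun a ha => isdigit_not_isspace a (h a ha))]
  rw [dropWhile_eq_self_of_false _ cs.reverse
    (fun a ha => isdigit_not_isspace a (h a (List.mem_reverse.mp ha)))]
  simp

lemma go_no_sep (sep : List Char) (hs : sep ≠ []) :
    ∀ (fuel : Nat) (l cur : List Char) (acc : List (List Char)),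
      (∀ c ∈ l, c ∉ sep) →
      PySem.Chars.splitOn.go sep fuel l cur acc = acc.reverse ++ [cur.reverse ++ l] := by
  intro fuel
  induction fuel with
  | zero =>
    intro l cur acc h
    simp [PySem.Chars.splitOn.go]
  | succ fuel ih =>
    intro l cur acc h
    cases l with
    | nil => simp [PySem.Chars.splitOn.go]
    | cons c rest =>
      obtain ⟨d, ds, rfl⟩ := List.exists_cons_of_ne_nil hs
      have hdc : d ≠ c := by
        intro hdc
        exact h c List.mem_cons_self (hdc ▸ List.mem_cons_self)
      have hpre : (d :: ds).isPrefixOf (c :: rest) = false := by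
        simp [List.isPrefixOf_cons₂]
        intro hc
        exact absurd hc hdc
      rw [PySem.Chars.splitOn.go]
      simp only [hpre, if_neg Bool.false_ne_true]
      rw [ih rest (c :: cur) acc (fun x hx => h x (List.mem_cons_of_mem _ hx))]
      simp

-- on a digit-only string the scanner's emission map is a single block
lemma emit_digit (pre s : String) (h : PySem.Str.strIsdigit s = true) :
    (PySem.Chars.splitOn s.toList [',']).map (pvEmit pre) =
      [pre ++ "." ++ s ++ "." ++ "attentions.1"] := by
  have hall : ∀ c ∈ s.toList, PySem.Chars.isdigit c = true := by
    simp [PySem.Str.strIsdigit, PySem.Chars.strIsdigit, List.all_eq_true] at h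
    exact h.2
  have hcomma : (',' : Char) ∉ s.toList := by
    intro hc
    have := hall _ hc
    simp [PySem.Chars.isdigit] at this
  unfold PySem.Chars.splitOn
  rw [go_no_sep [','] (by simp) _ s.toList [] []
    (by intro c hc; simp; intro hcc; exact hcomma (hcc ▸ hc))]
  simp [pvEmit, PySem.Str.strip, strip_digits s.toList hall, att_group]

-- ===== VERDICT (by name: the statement is the Claim_ definition above) =====
theorem generate_target_blocks_spec : Claim_equal_generate_target_blocks := by
  intro s l only _
  unfold Spec_generate_target_blocks generate_target_blocks generate_target_blocks_alt
  cases hs : PySem.Str.strIsdigit s <;> cases only <;>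
    simp only [Bool.not_false, Bool.not_true, if_neg Bool.false_ne_true,
      scan_eq_split, List.nil_append]
  · cases hl : PySem.Str.strIsdigit l
    · rw [a_map, a_map]
      simp
    · rw [a_map, emit_digit "down_blocks" l hl]
      simp
  · rw [a_map]
    simp
  · cases hl : PySem.Str.strIsdigit l
    · rw [a_map, emit_digit "up_blocks" s hs]
      simp
    · rw [emit_digit "up_blocks" s hs, emit_digit "down_blocks" l hl]
      simp
  · rw [emit_digit "up_blocks" s hs]
    simp
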